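-- pv_equiv track=rewrite | github.com/alexandraback/datacollection | solutions_5753053697277952_0/Python/divkakwani/p1.py | solve
-- ===== SOURCE A (Python) =====
-- def solve(n, P):
--
--     ans = []
--     total = sum(P[k] for k in P)
--     if total % 2 == 1:
--         c = max(P, key=P.get)
--         P[c] -= 1
--         ans.append(c)
--
--     while True:
--         most = max(P, key=P.get)
--         second_most = max(P, key=lambda c: -10 if c == most else P[c])
--         if P[most] == 0 and P[second_most] == 0:
--             break
--         else:
--             ans.append(most + second_most)
--             P[most] -= 1
--             P[second_most] -= 1
--     return ' '.join(ans)
-- ===== SOURCE B (Python) =====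
-- import heapq
--
-- def solve(n, P):
--     # Max-heap on (-count, insertion index): extract the two most-frequent keys
--     # each round instead of rescanning the whole dict twice per round.
--     total = sum(P.values())
--     heap = [(-v, i, k) for i, (k, v) in enumerate(P.items())]
--     heapq.heapify(heap)
--     out = []
--     if total % 2 == 1:
--         v, i, k = heapq.heappop(heap)
--         out.append(k)
--         heapq.heappush(heap, (v + 1, i, k))
--     while heap and heap[0][0] < 0:
--         v1, i1, k1 = heapq.heappop(heap)
--         if heap and heap[0][0] < 0:
--             v2, i2, k2 = heapq.heappop(heap)
--             out.append(k1 + k2)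
--             heapq.heappush(heap, (v1 + 1, i1, k1))
--             heapq.heappush(heap, (v2 + 1, i2, k2))
--         else:
--             # no second key with a remaining count: pair the key with itself
--             out.append(k1 + k1)
--             heapq.heappush(heap, (v1 + 2, i1, k1))
--     return ' '.join(out)
-- ===== Notes on version B (the rewrite author's own statement) =====
-- stated objective: faster
-- what changed: Replaces A's two full max()-scans of the dict per pairing round (including the -10-sentinel lambda scan) with a heapq max-heap keyed on (-count, insertion index), popping the top two keys per round and pushing them back decremented; a key with no positive-count partner left is paired with itself.
-- outside the precondition, e.g. on solve(0, {'a': 5, 'b': -8}): A returns 'a ab ab aa', B returns 'a aa aa'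
import Mathlib
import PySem

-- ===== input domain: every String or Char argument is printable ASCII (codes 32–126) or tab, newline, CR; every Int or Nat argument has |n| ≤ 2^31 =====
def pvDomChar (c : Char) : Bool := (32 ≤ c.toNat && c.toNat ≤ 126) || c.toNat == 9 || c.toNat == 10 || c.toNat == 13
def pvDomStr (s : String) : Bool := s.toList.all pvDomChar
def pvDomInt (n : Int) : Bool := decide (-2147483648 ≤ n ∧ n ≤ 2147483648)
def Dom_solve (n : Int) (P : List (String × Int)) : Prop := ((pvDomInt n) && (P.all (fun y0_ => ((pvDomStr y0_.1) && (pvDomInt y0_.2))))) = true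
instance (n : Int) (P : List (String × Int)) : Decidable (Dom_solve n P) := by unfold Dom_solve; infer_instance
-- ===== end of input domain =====

-- B replaces A's two full max-scans of the dict per round by a priority queue keyed on
-- (-count, insertion index) from which the top two keys are popped each round; the
-- equivalence is proved on Pre_solve, the inputs on which Python A terminates cleanly.
-- Python A mutates its dict argument P in place (decrementing counts); B does not —
-- the equivalence proved here is about the RETURN value only.

-- ===== PORT A =====
-- the `while True:` loop of A, with a fuel bound; on Pre_solve inputs the loop always
-- breaks before the fuel (each round removes 2 from the nonnegative counts)
def aloop : Nat → PySem.Dict String Int → List String → List String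
  | 0, _, ans => ans
  | fuel + 1, d, ans =>
    let most := (PySem.List.max? d.keys (fun k => d.getD k 0)).getD ""
    let second := (PySem.List.max? d.keys (fun c => if c = most then (-10 : Int) else d.getD c 0)).getD ""
    if d.getD most 0 = 0 ∧ d.getD second 0 = 0 then ans
    else
      let d1 := d.insert most (d.getD most 0 - 1)
      let d2 := d1.insert second (d1.getD second 0 - 1)
      aloop fuel d2 (ans ++ [most ++ second])

def solve (n : Int) (P : List (String × Int)) : String :=
  let d := PySem.Dict.ofList P
  let total := (d.keys.map (fun k => d.getD k 0)).sum
  let fuel := (d.values.map Int.natAbs).sum + 1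
  let st :=
    if PySem.Int.mod total 2 = 1 then
      let c := (PySem.List.max? d.keys (fun k => d.getD k 0)).getD ""
      (d.insert c (d.getD c 0 - 1), [c])
    else (d, ([] : List String))
  PySem.Str.join " " (aloop fuel st.1 st.2)

-- ===== PORT B =====
-- B's heapq of (-count, insertion index, key) is ported as a list kept sorted in the
-- heap's total order; heappop = take the head, heappush = ordered insert — the same
-- pop sequence as heapq, since the order is total (insertion indices are distinct)
def hpush (x : Int × Int × String) : List (Int × Int × String) → List (Int × Int × String)
  | [] => [x]
  | y :: ys => if x.1 < y.1 ∨ (x.1 = y.1 ∧ x.2.1 < y.2.1) then x :: y :: ys else y :: hpush x ys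

-- [(-v, i, k) for i, (k, v) in enumerate(P.items())]
def pvTriples (l : List (String × Int)) : List (Int × Int × String) :=
  (PySem.List.enumerate l).map (fun p => (-(p.2.2), p.1, p.2.1))

-- the `while heap and heap[0][0] < 0:` loop of B, with the same fuel device
def bloop : Nat → List (Int × Int × String) → List String → List String
  | 0, _, ans => ans
  | _ + 1, [], ans => ans
  | fuel + 1, [h1], ans =>
    if h1.1 < 0 then bloop fuel (hpush (h1.1 + 2, h1.2) []) (ans ++ [h1.2.2 ++ h1.2.2]) else ans
  | fuel + 1, h1 :: h2 :: rest2, ans =>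
    if h1.1 < 0 then
      if h2.1 < 0 then
        bloop fuel (hpush (h1.1 + 1, h1.2) (hpush (h2.1 + 1, h2.2) rest2)) (ans ++ [h1.2.2 ++ h2.2.2])
      else
        bloop fuel (hpush (h1.1 + 2, h1.2) (h2 :: rest2)) (ans ++ [h1.2.2 ++ h1.2.2])
    else ans

def solve_alt (n : Int) (P : List (String × Int)) : String :=
  let d := PySem.Dict.ofList P
  let total := d.values.sum
  let fuel := (d.values.map Int.natAbs).sum + 1
  let heap0 := (pvTriples d.items).foldl (fun acc x => hpush x acc) []
  let st :=
    if PySem.Int.mod total 2 = 1 then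
      match heap0 with
      | [] => (([] : List (Int × Int × String)), ([] : List String))
      | t :: rest => (hpush (t.1 + 1, t.2) rest, [t.2.2])
    else (heap0, ([] : List String))
  PySem.Str.join " " (bloop fuel st.1 st.2)

-- ===== PRECONDITION & SPEC =====
-- Pre_solve keeps exactly the inputs this file's claim is about: a nonempty dict whose
-- counts admit the greedy pairing (at least two nonnegative counts, matching parity, no
-- count above half the nonnegative total), or the degenerate self-pairing dicts (one
-- nonnegative count, every other count below A's -10 sentinel, or equal to -10 but
-- inserted later).  On the other inputs Python A raises (empty dict) or diverges (its
-- double-zero exit is never reached) — except for corner mixtures (e.g. a small count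
-- that drifts below the -10 sentinel during the loop), which are excluded and cited in
-- claim.json because A's eventual return value there is an accident of the sentinel.
def Pre_solve (n : Int) (P : List (String × Int)) : Prop :=
  let items := (PySem.Dict.ofList P).items
  let T := (items.map (·.2)).sum
  let adj := PySem.Int.mod T 2
  let NN := (items.map (·.2)).filter (fun v => decide (0 ≤ v))
  let S := NN.sum
  items ≠ [] ∧
  ((2 ≤ NN.length ∧ PySem.Int.mod (S - adj) 2 = 0 ∧ ∀ v ∈ NN, 2 * v ≤ S + adj) ∨
   (∃ j < items.length, 0 ≤ (items.getD j ("", 0)).2 ∧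
      PySem.Int.mod ((items.getD j ("", 0)).2 - adj) 2 = 0 ∧
      ∀ i < items.length, i ≠ j →
        ((items.getD i ("", 0)).2 < -10 ∨ ((items.getD i ("", 0)).2 = -10 ∧ j < i))))

instance (n : Int) (P : List (String × Int)) : Decidable (Pre_solve n P) := by
  unfold Pre_solve; infer_instance

def pvWitness_solve : Int × (List (String × Int)) := (0, [("a", 2), ("b", 2)])

def Spec_solve (n : Int) (P : List (String × Int)) (out : String) : Prop := out = solve_alt n P
instance (n : Int) (P : List (String × Int)) (out : String) : Decidable (Spec_solve n P out) := by
  unfold Spec_solve; infer_instance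

-- ===== CLAIM (what is proved, stated in full; the proofs are below) =====
def Claim_equal_solve : Prop := ∀ (n : Int) (P : List (String × Int)), Dom_solve n P → Pre_solve n P → Spec_solve n P (solve n P)
-- ===== LEMMAS AND PROOFS =====

def pvLtT (x y : Int × Int × String) : Prop := x.1 < y.1 ∨ (x.1 = y.1 ∧ x.2.1 < y.2.1)

theorem enumerate_mem {α : Type} (l : List α) (s : Int) (x : Int × α) :
    x ∈ PySem.List.enumerate l s ↔ ∃ j : Nat, ∃ h : j < l.length, x = (s + j, l[j]) := by
  induction l generalizing s with
  | nil => simp [PySem.List.enumerate]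
  | cons a t ih =>
    show x ∈ (s, a) :: PySem.List.enumerate t (s + 1) ↔ _
    simp only [List.mem_cons, ih]
    constructor
    · rintro (rfl | ⟨j, hj, rfl⟩)
      · exact ⟨0, by simp, by simp⟩
      · refine ⟨j + 1, by simpa using hj, ?_⟩
        push_cast
        simp [add_assoc, add_comm 1 (j:Int)]
    · rintro ⟨j, hj, rfl⟩
      cases j with
      | zero => left; simp
      | succ j =>
        right
        refine ⟨j, by simpa using hj, ?_⟩
        push_cast
        simp [add_assoc, add_comm 1 (j:Int)]

theorem triples_mem (l : List (String × Int)) (x : Int × Int × String) :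
    x ∈ pvTriples l ↔ ∃ j : Nat, ∃ h : j < l.length, x = (-(l[j].2), (j : Int), l[j].1) := by
  simp only [pvTriples, List.mem_map, enumerate_mem]
  constructor
  · rintro ⟨p, ⟨j, hj, rfl⟩, rfl⟩; exact ⟨j, hj, by simp⟩
  · rintro ⟨j, hj, rfl⟩; exact ⟨((j : Int), l[j]), ⟨j, hj, by simp⟩, rfl⟩

theorem enumerate_map {α β : Type} (g : α → β) (l : List α) (s : Int) :
    PySem.List.enumerate (l.map g) s = (PySem.List.enumerate l s).map (fun p => (p.1, g p.2)) := by
  induction l generalizing s with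
  | nil => rfl
  | cons a t ih =>
    show (s, g a) :: PySem.List.enumerate (t.map g) (s + 1) = _
    rw [ih]; rfl

theorem enumerate_fst_lb {α : Type} (l : List α) (s : Int) :
    ∀ y ∈ PySem.List.enumerate l s, s ≤ y.1 := by
  intro y hy
  rcases (enumerate_mem l s y).1 hy with ⟨j, hj, rfl⟩
  simp

theorem enumerate_fst_nodup {α : Type} (l : List α) (s : Int) :
    ((PySem.List.enumerate l s).map (·.1)).Nodup := by
  induction l generalizing s with
  | nil => simp [PySem.List.enumerate]
  | cons a t ih =>
    show (s :: (PySem.List.enumerate t (s+1)).map (·.1)).Nodup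
    refine List.nodup_cons.2 ⟨?_, ih (s+1)⟩
    intro hmem
    rcases List.mem_map.1 hmem with ⟨y, hy, heq⟩
    have := enumerate_fst_lb t (s+1) y hy
    omega

theorem enumerate_snd {α : Type} (l : List α) (s : Int) :
    (PySem.List.enumerate l s).map (·.2) = l := by
  induction l generalizing s with
  | nil => rfl
  | cons a t ih =>
    show a :: (PySem.List.enumerate t (s+1)).map (·.2) = _
    rw [ih]

theorem triples_idx_nodup (l : List (String × Int)) :
    ((pvTriples l).map (fun t => t.2.1)).Nodup := by
  have h1 : (pvTriples l).map (fun t => t.2.1) = (PySem.List.enumerate l 0).map (·.1) := by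
    simp only [pvTriples, List.map_map]; rfl
  rw [h1]
  exact enumerate_fst_nodup l 0

theorem triples_length (l : List (String × Int)) : (pvTriples l).length = l.length := by
  have h : (PySem.List.enumerate l 0).length = l.length := by
    conv_rhs => rw [← enumerate_snd l 0]
    simp
  simp [pvTriples, h]

theorem hpush_perm (x : Int × Int × String) (l : List (Int × Int × String)) :
    (hpush x l).Perm (x :: l) := by
  induction l with
  | nil => exact List.Perm.refl _
  | cons y ys ih =>
    simp only [hpush]
    split
    · exact List.Perm.refl _
    · exact ((ih.cons y).trans (List.Perm.swap x y ys))

theorem hpush_pairwise (x : Int × Int × String) (l : List (Int × Int × String))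
    (hp : l.Pairwise pvLtT) (hx : ∀ y ∈ l, x.2.1 ≠ y.2.1) : (hpush x l).Pairwise pvLtT := by
  induction l with
  | nil => simp [hpush, List.pairwise_cons]
  | cons y ys ih =>
    rw [List.pairwise_cons] at hp
    simp only [hpush]
    split
    next hc =>
      refine List.pairwise_cons.2 ⟨?_, List.pairwise_cons.2 ⟨hp.1, hp.2⟩⟩
      intro z hz
      rcases List.mem_cons.1 hz with rfl | hz'
      · exact hc
      · rcases hc with h | ⟨he, hi⟩
        · rcases hp.1 z hz' with h2 | ⟨he2, hi2⟩
          · exact Or.inl (by omega)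
          · exact Or.inl (by omega)
        · rcases hp.1 z hz' with h2 | ⟨he2, hi2⟩
          · exact Or.inl (by omega)
          · exact Or.inr ⟨by omega, by omega⟩
    next hc =>
      have hyx : pvLtT y x := by
        have hne := hx y List.mem_cons_self
        have hc1 : ¬ x.1 < y.1 := fun h => hc (Or.inl h)
        have hc2 : ¬ (x.1 = y.1 ∧ x.2.1 < y.2.1) := fun h => hc (Or.inr h)
        unfold pvLtT
        rcases lt_trichotomy x.1 y.1 with h | h | h
        · exact absurd h hc1
        · refine Or.inr ⟨h.symm, ?_⟩
          have : ¬ x.2.1 < y.2.1 := fun hl => hc2 ⟨h, hl⟩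
          omega
        · exact Or.inl h
      refine List.pairwise_cons.2 ⟨?_, ih hp.2 (fun z hz => hx z (List.mem_cons_of_mem _ hz))⟩
      intro z hz
      rcases List.mem_cons.1 (((hpush_perm x ys).mem_iff).1 hz) with h | h
      · subst h; exact hyx
      · exact hp.1 z h

theorem heapify_perm (l acc : List (Int × Int × String)) :
    (l.foldl (fun a x => hpush x a) acc).Perm (acc ++ l) := by
  induction l generalizing acc with
  | nil => simp
  | cons b t ih =>
    simp only [List.foldl_cons]
    refine (ih (hpush b acc)).trans ?_
    have h1 : (hpush b acc ++ t).Perm ((b :: acc) ++ t) :=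
      (hpush_perm b acc).append_right t
    refine h1.trans ?_
    simp only [List.cons_append]
    exact (List.Perm.symm (List.perm_middle))

theorem heapify_pairwise (l acc : List (Int × Int × String)) (hp : acc.Pairwise pvLtT)
    (hnd : ((acc ++ l).map (fun t => t.2.1)).Nodup) :
    (l.foldl (fun a x => hpush x a) acc).Pairwise pvLtT := by
  induction l generalizing acc with
  | nil => simpa using hp
  | cons b t ih =>
    simp only [List.foldl_cons]
    have hbacc : ∀ y ∈ acc, b.2.1 ≠ y.2.1 := by
      intro y hy hne
      have h1 : (acc ++ b :: t).map (fun t => t.2.1) = acc.map (fun t => t.2.1) ++ b.2.1 :: t.map (fun t => t.2.1) := by simp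
      rw [h1] at hnd
      have hd := List.disjoint_of_nodup_append hnd
      exact hd (List.mem_map_of_mem hy) (by rw [← hne]; exact List.mem_cons_self)
    apply ih (hpush b acc) (hpush_pairwise b acc hp hbacc)
    have hperm : ((hpush b acc ++ t).map (fun t => t.2.1)).Perm (((acc ++ b :: t)).map (fun t => t.2.1)) := by
      refine List.Perm.map _ ?_
      refine ((hpush_perm b acc).append_right t).trans ?_
      simp only [List.cons_append]
      exact List.Perm.symm List.perm_middle
    exact hperm.symm.nodup hnd

def pvstep {α : Type} (f : α → Int) : Option α → α → Option α :=
  fun acc x => match acc with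
  | none => some x
  | some m => if f m < f x then some x else some m

theorem max?_eq_foldl {α : Type} (xs : List α) (f : α → Int) :
    PySem.List.max? xs f = xs.foldl (pvstep f) none := rfl

theorem foldl_pvstep_keep {α : Type} (f : α → Int) (t : List α) (m : α)
    (h : ∀ y ∈ t, ¬ f m < f y) : t.foldl (pvstep f) (some m) = some m := by
  induction t with
  | nil => rfl
  | cons b t' ih =>
    have : pvstep f (some m) b = some m := by
      simp only [pvstep, if_neg (h b List.mem_cons_self)]
    rw [List.foldl_cons, this]
    exact ih (fun y hy => h y (List.mem_cons_of_mem _ hy))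

theorem foldl_pvstep_find {α : Type} (f : α → Int) (t : List α) (m : α) (j : Nat)
    (hj : j < t.length) (hm : f m < f t[j])
    (hfirst : ∀ i, (h : i < j) → f t[i] < f t[j])
    (hall : ∀ y ∈ t, f y ≤ f t[j]) :
    t.foldl (pvstep f) (some m) = some t[j] := by
  induction t generalizing m j with
  | nil => simp at hj
  | cons b t' ih =>
    rw [List.foldl_cons]
    cases j with
    | zero =>
      simp only [List.getElem_cons_zero] at hm hall ⊢
      have : pvstep f (some m) b = some b := by simp only [pvstep, if_pos hm]
      rw [this]
      exact foldl_pvstep_keep f t' b (fun y hy => by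
        have := hall y (List.mem_cons_of_mem _ hy); simp at this ⊢; omega)
    | succ jj =>
      have hb : f b < f (b :: t')[jj + 1] := hfirst 0 (Nat.succ_pos jj)
      have hjj : jj < t'.length := by simpa using hj
      have hstep : ∃ a, pvstep f (some m) b = some a ∧ f a < f t'[jj] := by
        by_cases hc : f m < f b
        · exact ⟨b, by simp only [pvstep, if_pos hc], by simpa using hb⟩
        · exact ⟨m, by simp only [pvstep, if_neg hc], by simpa using hm⟩
      rcases hstep with ⟨a, ha, hal⟩
      rw [ha]
      have := ih a jj hjj hal
        (fun i hi => by simpa using hfirst (i + 1) (by omega))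
        (fun y hy => by simpa using hall y (List.mem_cons_of_mem _ hy))
      simpa using this

theorem max?_eq_of_first {α : Type} (xs : List α) (f : α → Int) (j : Nat) (hj : j < xs.length)
    (hall : ∀ y ∈ xs, f y ≤ f xs[j]) (hfirst : ∀ i, (h : i < j) → f xs[i] < f xs[j]) :
    PySem.List.max? xs f = some xs[j] := by
  rw [max?_eq_foldl]
  cases xs with
  | nil => simp at hj
  | cons b t =>
    rw [List.foldl_cons]
    have hb : pvstep f none b = some b := rfl
    rw [hb]
    cases j with
    | zero =>
      exact foldl_pvstep_keep f t b (fun y hy => by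
        have := hall y (List.mem_cons_of_mem _ hy); simp at this ⊢; omega)
    | succ jj =>
      have hjj : jj < t.length := by simpa using hj
      have := foldl_pvstep_find f t b jj hjj
        (by simpa using hfirst 0 (Nat.succ_pos jj))
        (fun i hi => by simpa using hfirst (i + 1) (by omega))
        (fun y hy => by simpa using hall y (List.mem_cons_of_mem _ hy))
      simpa using this

theorem keys_eq_items (d : PySem.Dict String Int) : d.keys = d.items.map (·.1) := by
  simp [PySem.Dict.keys]

theorem keyidx_inj (d : PySem.Dict String Int) (hnd : d.keys.Nodup) (i j : Nat)
    (hi : i < d.items.length) (hj : j < d.items.length) (he : d.items[i].1 = d.items[j].1) :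
    i = j := by
  rw [keys_eq_items] at hnd
  have h1 : (d.items.map (·.1))[i]'(by simpa using hi) = (d.items.map (·.1))[j]'(by simpa using hj) := by
    simpa using he
  exact (List.Nodup.getElem_inj_iff hnd).mp h1

theorem getD_at (d : PySem.Dict String Int) (hnd : d.keys.Nodup) (i : Nat)
    (hi : i < d.items.length) : d.getD (d.items[i].1) 0 = d.items[i].2 := by
  have hm : (d.items[i].1, d.items[i].2) ∈ d.items := by
    have := List.getElem_mem hi
    simpa using this
  exact PySem.Dict.getD_of_mem_items d hm hnd 0

theorem triple_at_mem (l : List (String × Int)) (i : Nat) (h : i < l.length) :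
    (-(l[i].2), (i : Int), l[i].1) ∈ pvTriples l := (triples_mem l _).2 ⟨i, h, rfl⟩

-- A's `max(P, key=P.get)` is the key of the head of B's heap

theorem most_eq (d : PySem.Dict String Int) (h1 : Int × Int × String)
    (rest : List (Int × Int × String)) (hnd : d.keys.Nodup)
    (hperm : (h1 :: rest).Perm (pvTriples d.items)) (hpw : (h1 :: rest).Pairwise pvLtT) :
    PySem.List.max? d.keys (fun k => d.getD k 0) = some h1.2.2 ∧ d.getD h1.2.2 0 = -h1.1 := by
  have hh1 : h1 ∈ pvTriples d.items := hperm.mem_iff.1 List.mem_cons_self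
  rcases (triples_mem _ _).1 hh1 with ⟨j, hj, hh⟩
  have hrel : ∀ i : Nat, (hi : i < d.items.length) → i ≠ j →
      (-(d.items[i].2), (i : Int), d.items[i].1) ∈ rest := by
    intro i hi hne
    have hm : (-(d.items[i].2), (i : Int), d.items[i].1) ∈ h1 :: rest :=
      hperm.mem_iff.2 (triple_at_mem d.items i hi)
    rcases List.mem_cons.1 hm with he | h
    · exfalso
      rw [hh] at he
      have h2 : (i : Int) = (j : Int) := by
        simpa using congrArg (fun t : Int × Int × String => t.2.1) he
      omega
    · exact h
  have hlt : ∀ i : Nat, (hi : i < d.items.length) → i ≠ j →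
      pvLtT h1 (-(d.items[i].2), (i : Int), d.items[i].1) := by
    intro i hi hne
    exact (List.pairwise_cons.1 hpw).1 _ (hrel i hi hne)
  have hkl : d.keys.length = d.items.length := by rw [keys_eq_items]; simp
  have hkg : ∀ i : Nat, (hi : i < d.items.length) → d.keys[i]'(by omega) = d.items[i].1 := by
    intro i hi
    simp [keys_eq_items]
  have hmax := max?_eq_of_first d.keys (fun k => d.getD k 0) j (by omega)
    (by
      intro y hy
      rcases List.mem_iff_getElem.mp hy with ⟨i, hi, rfl⟩
      have hi' : i < d.items.length := by omega
      rw [hkg i hi', hkg j hj]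
      show d.getD (d.items[i].1) 0 ≤ d.getD (d.items[j].1) 0
      rw [getD_at d hnd i hi', getD_at d hnd j hj]
      by_cases hij : i = j
      · subst hij; omega
      · rcases hlt i hi' hij with h | ⟨he, _⟩
        · rw [hh] at h; simp at h; omega
        · rw [hh] at he; simp at he; omega)
    (by
      intro i hi
      have hi' : i < d.items.length := by omega
      have hij : i ≠ j := by omega
      rw [hkg i hi', hkg j hj]
      show d.getD (d.items[i].1) 0 < d.getD (d.items[j].1) 0
      rw [getD_at d hnd i hi', getD_at d hnd j hj]
      rcases hlt i hi' hij with h | ⟨he, hidx⟩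
      · rw [hh] at h; simp at h; omega
      · exfalso; rw [hh] at hidx; simp at hidx; omega)
  constructor
  · rw [hmax, hkg j hj, hh]
  · rw [hh]; simpa using getD_at d hnd j hj

theorem keyne (d : PySem.Dict String Int) (hnd : d.keys.Nodup) (i j : Nat)
    (hi : i < d.items.length) (hj : j < d.items.length) (hne : i ≠ j) :
    d.items[i].1 ≠ d.items[j].1 := fun he => hne (keyidx_inj d hnd i j hi hj he)

theorem second_pair_eq (d : PySem.Dict String Int) (h1 h2 : Int × Int × String)
    (rest2 : List (Int × Int × String)) (hnd : d.keys.Nodup)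
    (hperm : (h1 :: h2 :: rest2).Perm (pvTriples d.items))
    (hpw : (h1 :: h2 :: rest2).Pairwise pvLtT) (hh2 : h2.1 ≤ 0) :
    PySem.List.max? d.keys (fun c => if c = h1.2.2 then (-10 : Int) else d.getD c 0) = some h2.2.2 ∧
    d.getD h2.2.2 0 = -h2.1 ∧ h2.2.2 ≠ h1.2.2 := by
  have hm1 : h1 ∈ pvTriples d.items := hperm.mem_iff.1 List.mem_cons_self
  have hm2 : h2 ∈ pvTriples d.items := hperm.mem_iff.1 (List.mem_cons_of_mem _ List.mem_cons_self)
  rcases (triples_mem _ _).1 hm1 with ⟨j1, hj1, hhd1⟩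
  rcases (triples_mem _ _).1 hm2 with ⟨j2, hj2, hhd2⟩
  have hpw1 := List.pairwise_cons.1 hpw
  have hpw2 := List.pairwise_cons.1 hpw1.2
  have hne12 : j1 ≠ j2 := by
    intro he
    subst he
    have : h1 = h2 := by rw [hhd1, hhd2]
    have hlt := hpw1.1 h2 List.mem_cons_self
    rw [this] at hlt
    rcases hlt with h | ⟨_, h⟩ <;> omega
  have hkey12 : d.items[j2].1 ≠ d.items[j1].1 := keyne d hnd j2 j1 hj2 hj1 (by omega)
  have hrel : ∀ i : Nat, (hi : i < d.items.length) → i ≠ j1 → i ≠ j2 →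
      (-(d.items[i].2), (i : Int), d.items[i].1) ∈ rest2 := by
    intro i hi hne1 hne2
    have hm : (-(d.items[i].2), (i : Int), d.items[i].1) ∈ h1 :: h2 :: rest2 :=
      hperm.mem_iff.2 (triple_at_mem d.items i hi)
    rcases List.mem_cons.1 hm with he | hm' 
    · exfalso; rw [hhd1] at he
      have := congrArg (fun t : Int × Int × String => t.2.1) he
      simp at this; omega
    · rcases List.mem_cons.1 hm' with he | h
      · exfalso; rw [hhd2] at he
        have := congrArg (fun t : Int × Int × String => t.2.1) he
        simp at this; omega
      · exact h
  have hkl : d.keys.length = d.items.length := by rw [keys_eq_items]; simp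
  have hkg : ∀ i : Nat, (hi : i < d.items.length) → d.keys[i]'(by omega) = d.items[i].1 := by
    intro i hi; simp [keys_eq_items]
  have hfj2 : (if d.items[j2].1 = h1.2.2 then (-10 : Int) else d.getD (d.items[j2].1) 0) = -h2.1 := by
    rw [if_neg (by rw [hhd1]; simpa using hkey12), getD_at d hnd j2 hj2, hhd2]; simp
  have hmax := max?_eq_of_first d.keys (fun c => if c = h1.2.2 then (-10 : Int) else d.getD c 0) j2 (by omega)
    (by
      intro y hy
      rcases List.mem_iff_getElem.mp hy with ⟨i, hi, rfl⟩
      have hi' : i < d.items.length := by omega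
      rw [hkg i hi', hkg j2 hj2]
      show (if d.items[i].1 = h1.2.2 then (-10 : Int) else d.getD (d.items[i].1) 0) ≤
        (if d.items[j2].1 = h1.2.2 then (-10 : Int) else d.getD (d.items[j2].1) 0)
      rw [hfj2]
      by_cases hij1 : i = j1
      · subst hij1; rw [if_pos (by rw [hhd1])]; omega
      · rw [if_neg (by rw [hhd1]; simpa using keyne d hnd i j1 hi' hj1 hij1), getD_at d hnd i hi']
        by_cases hij2 : i = j2
        · subst hij2; rw [hhd2]; simp
        · have hlt := hpw2.1 _ (hrel i hi' hij1 hij2)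
          rw [hhd2]
          show d.items[i].2 ≤ -(-d.items[j2].2)
          rw [neg_neg]
          rcases hlt with h | ⟨he, _⟩
          · rw [hhd2] at h; simp at h; omega
          · rw [hhd2] at he; simp at he; omega)
    (by
      intro i hi
      have hi' : i < d.items.length := by omega
      rw [hkg i hi', hkg j2 hj2]
      show (if d.items[i].1 = h1.2.2 then (-10 : Int) else d.getD (d.items[i].1) 0) <
        (if d.items[j2].1 = h1.2.2 then (-10 : Int) else d.getD (d.items[j2].1) 0)
      rw [hfj2]
      by_cases hij1 : i = j1
      · subst hij1; rw [if_pos (by rw [hhd1])]; omega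
      · rw [if_neg (by rw [hhd1]; simpa using keyne d hnd i j1 hi' hj1 hij1), getD_at d hnd i hi']
        have hij2 : i ≠ j2 := by omega
        have hlt := hpw2.1 _ (hrel i hi' hij1 hij2)
        rw [hhd2]
        show d.items[i].2 < -(-d.items[j2].2)
        rw [neg_neg]
        rcases hlt with h | ⟨he, hidx⟩
        · rw [hhd2] at h; simp at h; omega
        · exfalso; rw [hhd2] at hidx; simp at hidx; omega)
  refine ⟨?_, ?_, ?_⟩
  · rw [hmax, hkg j2 hj2, hhd2]
  · rw [hhd2]; simpa using getD_at d hnd j2 hj2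
  · rw [hhd1, hhd2]; simpa using hkey12

theorem second_self_eq (d : PySem.Dict String Int) (h1 : Int × Int × String)
    (rest : List (Int × Int × String)) (hnd : d.keys.Nodup)
    (hperm : (h1 :: rest).Perm (pvTriples d.items)) (hpw : (h1 :: rest).Pairwise pvLtT)
    (hself : ∀ t ∈ rest, 10 < t.1 ∨ (t.1 = 10 ∧ h1.2.1 < t.2.1)) :
    PySem.List.max? d.keys (fun c => if c = h1.2.2 then (-10 : Int) else d.getD c 0) = some h1.2.2 := by
  have hm1 : h1 ∈ pvTriples d.items := hperm.mem_iff.1 List.mem_cons_self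
  rcases (triples_mem _ _).1 hm1 with ⟨j1, hj1, hhd1⟩
  have hrel : ∀ i : Nat, (hi : i < d.items.length) → i ≠ j1 →
      (-(d.items[i].2), (i : Int), d.items[i].1) ∈ rest := by
    intro i hi hne
    have hm : (-(d.items[i].2), (i : Int), d.items[i].1) ∈ h1 :: rest :=
      hperm.mem_iff.2 (triple_at_mem d.items i hi)
    rcases List.mem_cons.1 hm with he | h
    · exfalso; rw [hhd1] at he
      have := congrArg (fun t : Int × Int × String => t.2.1) he
      simp at this; omega
    · exact h
  have hkl : d.keys.length = d.items.length := by rw [keys_eq_items]; simp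
  have hkg : ∀ i : Nat, (hi : i < d.items.length) → d.keys[i]'(by omega) = d.items[i].1 := by
    intro i hi; simp [keys_eq_items]
  have hfj1 : (if d.items[j1].1 = h1.2.2 then (-10 : Int) else d.getD (d.items[j1].1) 0) = -10 := by
    rw [if_pos (by rw [hhd1])]
  have hmax := max?_eq_of_first d.keys (fun c => if c = h1.2.2 then (-10 : Int) else d.getD c 0) j1 (by omega)
    (by
      intro y hy
      rcases List.mem_iff_getElem.mp hy with ⟨i, hi, rfl⟩
      have hi' : i < d.items.length := by omega
      rw [hkg i hi', hkg j1 hj1]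
      show (if d.items[i].1 = h1.2.2 then (-10 : Int) else d.getD (d.items[i].1) 0) ≤
        (if d.items[j1].1 = h1.2.2 then (-10 : Int) else d.getD (d.items[j1].1) 0)
      rw [hfj1]
      by_cases hij1 : i = j1
      · subst hij1; rw [if_pos (by rw [hhd1])]
      · rw [if_neg (by rw [hhd1]; simpa using keyne d hnd i j1 hi' hj1 hij1), getD_at d hnd i hi']
        rcases hself _ (hrel i hi' hij1) with h | ⟨he, _⟩
        · simp at h; omega
        · simp at he; omega)
    (by
      intro i hi
      have hi' : i < d.items.length := by omega
      rw [hkg i hi', hkg j1 hj1]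
      show (if d.items[i].1 = h1.2.2 then (-10 : Int) else d.getD (d.items[i].1) 0) <
        (if d.items[j1].1 = h1.2.2 then (-10 : Int) else d.getD (d.items[j1].1) 0)
      rw [hfj1]
      have hij1 : i ≠ j1 := by omega
      rw [if_neg (by rw [hhd1]; simpa using keyne d hnd i j1 hi' hj1 hij1), getD_at d hnd i hi']
      rcases hself _ (hrel i hi' hij1) with h | ⟨he, hidx⟩
      · simp at h; omega
      · exfalso; rw [hhd1] at hidx; simp at hidx; omega)
  rw [hmax, hkg j1 hj1, hhd1]

theorem triples_insert (d : PySem.Dict String Int) (hnd : d.keys.Nodup) (jn : Nat)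
    (hj : jn < d.items.length) (w : Int) :
    pvTriples ((d.insert (d.items[jn].1) w).items) =
      (pvTriples d.items).map
        (fun t => if t.2.1 = (jn : Int) then (-w, t.2.1, t.2.2) else t) := by
  have hcont : d.contains (d.items[jn].1) = true := by
    refine (PySem.Dict.contains_iff_mem_keys d _).mpr ?_
    rw [keys_eq_items]
    exact List.mem_map_of_mem (List.getElem_mem hj)
  rw [PySem.Dict.items_insert_of_contains d w hcont]
  unfold pvTriples
  rw [enumerate_map]
  rw [List.map_map, List.map_map]
  apply List.map_congr_left
  intro p hp
  rcases (enumerate_mem _ _ _).1 hp with ⟨i, hi, rfl⟩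
  simp only [Function.comp]
  by_cases hij : i = jn
  · subst hij
    have hbeq : (d.items[i].1 == d.items[i].1) = true := by simp
    simp only [zero_add, hbeq, if_true, if_pos rfl]
  · have hbeq : (d.items[i].1 == d.items[jn].1) = false := by
      simp only [beq_eq_false_iff_ne, ne_eq]
      exact keyne d hnd i jn hi hj hij
    have hine : ((i : Int) = (jn : Int)) = False := by
      simp; omega
    simp only [zero_add, hbeq, Bool.false_eq_true, if_false, hine, if_false]

theorem perm_idx_nodup (d : PySem.Dict String Int) (H : List (Int × Int × String))
    (hperm : H.Perm (pvTriples d.items)) : (H.map (fun t => t.2.1)).Nodup :=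
  ((hperm.map (fun t => t.2.1)).symm).nodup (triples_idx_nodup d.items)

theorem perm_upd (d : PySem.Dict String Int) (h1 : Int × Int × String)
    (rest : List (Int × Int × String)) (hnd : d.keys.Nodup)
    (hperm : (h1 :: rest).Perm (pvTriples d.items)) (w : Int) :
    ((-w, h1.2) :: rest).Perm (pvTriples ((d.insert h1.2.2 w).items)) := by
  have hh1 : h1 ∈ pvTriples d.items := hperm.mem_iff.1 List.mem_cons_self
  rcases (triples_mem _ _).1 hh1 with ⟨j1, hj1, hhd1⟩
  have hkey : h1.2.2 = d.items[j1].1 := by rw [hhd1]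
  rw [hkey, triples_insert d hnd j1 hj1 w]
  have hidx := perm_idx_nodup d _ hperm
  have hrestid : ∀ t ∈ rest, (if t.2.1 = (j1 : Int) then ((-w, t.2.1, t.2.2) : Int × Int × String) else t) = t := by
    intro t ht
    rw [if_neg]
    intro he
    rw [List.map_cons] at hidx
    rcases List.nodup_cons.1 hidx with ⟨hnotin, _⟩
    apply hnotin
    have hj : h1.2.1 = (j1 : Int) := by rw [hhd1]
    rw [hj, ← he]
    exact List.mem_map_of_mem ht
  have hmapped : (h1 :: rest).map (fun t => if t.2.1 = (j1 : Int) then (-w, t.2.1, t.2.2) else t) =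
      (-w, h1.2) :: rest := by
    rw [List.map_cons]
    congr 1
    · rw [if_pos (by rw [hhd1])]
    · calc rest.map (fun t => if t.2.1 = (j1 : Int) then ((-w, t.2.1, t.2.2) : Int × Int × String) else t)
          = rest.map id := List.map_congr_left (fun t ht => hrestid t ht)
        _ = rest := List.map_id rest
  rw [← hmapped]
  exact hperm.map _

theorem hpush_head (x : Int × Int × String) (l : List (Int × Int × String))
    (h : ∀ y ∈ l, x.1 < y.1) : hpush x l = x :: l := by
  cases l with
  | nil => rfl
  | cons y ys =>
    simp only [hpush]
    rw [if_pos (Or.inl (h y List.mem_cons_self))]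

def pvNN (H : List (Int × Int × String)) : List Int :=
  (H.filter (fun t => decide (t.1 ≤ 0))).map (fun t => -t.1)

def pvGoodPair (H : List (Int × Int × String)) : Prop :=
  2 ≤ (pvNN H).length ∧ 2 ∣ (pvNN H).sum ∧ ∀ v ∈ pvNN H, 2 * v ≤ (pvNN H).sum

def pvGoodSelf (H : List (Int × Int × String)) : Prop :=
  ∃ h1 rest, H = h1 :: rest ∧ h1.1 ≤ 0 ∧ 2 ∣ h1.1 ∧
    ∀ t ∈ rest, 10 < t.1 ∨ (t.1 = 10 ∧ h1.2.1 < t.2.1)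

theorem pvNN_cons (t : Int × Int × String) (l : List (Int × Int × String)) :
    pvNN (t :: l) = if t.1 ≤ 0 then -t.1 :: pvNN l else pvNN l := by
  by_cases h : t.1 ≤ 0 <;> simp [pvNN, List.filter_cons, h]

theorem pvNN_perm (H H' : List (Int × Int × String)) (h : H.Perm H') :
    (pvNN H).Perm (pvNN H') := (h.filter _).map _

theorem pvNN_nonneg (H : List (Int × Int × String)) : ∀ v ∈ pvNN H, 0 ≤ v := by
  intro v hv
  rcases List.mem_map.1 hv with ⟨t, ht, rfl⟩
  have := List.of_mem_filter ht
  simp at this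
  omega

theorem goodpair_perm (H H' : List (Int × Int × String)) (h : H.Perm H')
    (hg : pvGoodPair H') : pvGoodPair H := by
  have hp := pvNN_perm H H' h
  obtain ⟨hq, hd, hb⟩ := hg
  exact ⟨by rw [hp.length_eq]; exact hq, by rw [hp.sum_eq]; exact hd,
    fun v hv => by rw [hp.sum_eq]; exact hb v (hp.mem_iff.1 hv)⟩

theorem sorted_le_head (h1 : Int × Int × String) (rest : List (Int × Int × String))
    (hpw : (h1 :: rest).Pairwise pvLtT) : ∀ t ∈ rest, h1.1 ≤ t.1 := by
  intro t ht
  rcases (List.pairwise_cons.1 hpw).1 t ht with h | ⟨he, _⟩ <;> omega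

theorem pair_h2_neg (h1 h2 : Int × Int × String) (rest2 : List (Int × Int × String))
    (hpw : (h1 :: h2 :: rest2).Pairwise pvLtT) (hg : pvGoodPair (h1 :: h2 :: rest2))
    (hneg : h1.1 < 0) : h2.1 < 0 := by
  by_contra hc
  push_neg at hc
  obtain ⟨hq, hd, hb⟩ := hg
  have hrest : ∀ t ∈ h2 :: rest2, 0 ≤ t.1 := by
    intro t ht
    rcases List.mem_cons.1 ht with rfl | ht'
    · exact hc
    · have := sorted_le_head h2 rest2 (List.pairwise_cons.1 hpw).2 t ht'
      omega
  have hz : (pvNN (h2 :: rest2)).sum = 0 := by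
    apply List.sum_eq_zero
    intro v hv
    rcases List.mem_map.1 hv with ⟨t, ht, rfl⟩
    have h0 := List.of_mem_filter ht
    have h1' := hrest t (List.mem_of_mem_filter ht)
    simp at h0
    omega
  rw [pvNN_cons, if_pos (by omega)] at hq hd hb
  have hM := hb (-h1.1) List.mem_cons_self
  rw [List.sum_cons, hz] at hM
  omega

theorem pair_break (h1 : Int × Int × String) (rest : List (Int × Int × String))
    (hpw : (h1 :: rest).Pairwise pvLtT) (hg : pvGoodPair (h1 :: rest))
    (hnneg : ¬ h1.1 < 0) :
    h1.1 = 0 ∧ ∃ h2 rest2, rest = h2 :: rest2 ∧ h2.1 = 0 := by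
  obtain ⟨hq, hd, hb⟩ := hg
  have hh1 : h1.1 = 0 := by
    by_contra hc
    have hpos : 0 < h1.1 := by omega
    have : pvNN (h1 :: rest) = [] := by
      have : ∀ t ∈ h1 :: rest, ¬ (t.1 ≤ 0) := by
        intro t ht
        rcases List.mem_cons.1 ht with rfl | ht'
        · omega
        · have := sorted_le_head h1 rest hpw t ht'; omega
      simp only [pvNN]
      rw [List.filter_eq_nil_iff.2 (by intro t ht; simpa using this t ht)]
      rfl
    rw [this] at hq
    simp at hq
  refine ⟨hh1, ?_⟩
  cases rest with
  | nil =>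
    exfalso
    rw [pvNN_cons, if_pos (by omega)] at hq
    simp [pvNN] at hq
  | cons h2 rest2 =>
    refine ⟨h2, rest2, rfl, ?_⟩
    have hle := sorted_le_head h1 _ hpw h2 List.mem_cons_self
    by_contra hc
    have hpos : 0 < h2.1 := by omega
    have hrest0 : ∀ t ∈ h2 :: rest2, ¬ (t.1 ≤ 0) := by
      intro t ht
      rcases List.mem_cons.1 ht with rfl | ht'
      · omega
      · have := sorted_le_head h2 rest2 (List.pairwise_cons.1 hpw).2 t ht'; omega
    have hnil : pvNN (h2 :: rest2) = [] := by
      simp only [pvNN]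
      rw [List.filter_eq_nil_iff.2 (by intro t ht; simpa using hrest0 t ht)]
      rfl
    rw [pvNN_cons, if_pos (by omega), hnil] at hq
    simp at hq

def pvInv (d : PySem.Dict String Int) (H : List (Int × Int × String)) : Prop :=
  d.keys.Nodup ∧ H.Perm (pvTriples d.items) ∧ H.Pairwise pvLtT ∧ (pvGoodSelf H ∨ pvGoodPair H)

theorem mem_key_contains (d : PySem.Dict String Int) (h1 : Int × Int × String)
    (hm : h1 ∈ pvTriples d.items) : d.contains h1.2.2 = true := by
  rcases (triples_mem _ _).1 hm with ⟨j1, hj1, rfl⟩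
  refine (PySem.Dict.contains_iff_mem_keys d _).mpr ?_
  rw [keys_eq_items]
  exact List.mem_map_of_mem (List.getElem_mem hj1)

theorem good_pair_step (h1 h2 : Int × Int × String) (rest2 : List (Int × Int × String))
    (hpw : (h1 :: h2 :: rest2).Pairwise pvLtT) (hg : pvGoodPair (h1 :: h2 :: rest2))
    (h1neg : h1.1 < 0) (h2neg : h2.1 < 0) :
    pvGoodPair ((h1.1 + 1, h1.2) :: (h2.1 + 1, h2.2) :: rest2) := by
  obtain ⟨hq, hd, hb⟩ := hg
  rw [pvNN_cons, if_pos (by omega), pvNN_cons, if_pos (by omega)] at hq hd hb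
  have hM := hb (-h1.1) List.mem_cons_self
  have hM2 := hb (-h2.1) (List.mem_cons_of_mem _ List.mem_cons_self)
  simp only [List.sum_cons] at hd hb hM hM2 ⊢
  refine ⟨?_, ?_, ?_⟩
  · rw [pvNN_cons, if_pos (by simp; omega), pvNN_cons, if_pos (by simp; omega)]
    simpa using hq
  · rw [pvNN_cons, if_pos (by simp; omega), pvNN_cons, if_pos (by simp; omega)]
    simp only [List.sum_cons]
    simp only [show -(h1.1 + 1) = -h1.1 - 1 by ring, show -(h2.1 + 1) = -h2.1 - 1 by ring]
    omega
  · rw [pvNN_cons, if_pos (by simp; omega), pvNN_cons, if_pos (by simp; omega)]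
    intro v hv
    simp only [List.sum_cons]
    rcases List.mem_cons.1 hv with rfl | hv'
    · simp; omega
    rcases List.mem_cons.1 hv' with rfl | hv''
    · simp; omega
    · have hbv := hb v (List.mem_cons_of_mem _ (List.mem_cons_of_mem _ hv''))
      rcases List.mem_map.1 hv'' with ⟨t, htf, rfl⟩
      have ht2 : t ∈ rest2 := List.mem_of_mem_filter htf
      have htle : t.1 ≤ 0 := by have := List.of_mem_filter htf; simpa using this
      have hcM2 : -t.1 ≤ -h2.1 := by
        have := sorted_le_head h2 rest2 (List.pairwise_cons.1 hpw).2 t ht2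
        omega
      have hcR : -t.1 ≤ (pvNN rest2).sum :=
        List.single_le_sum (pvNN_nonneg rest2) _ (List.mem_map.2 ⟨t, htf, rfl⟩)
      omega

theorem good_pair_odd (h1 : Int × Int × String) (rest : List (Int × Int × String))
    (hpw : (h1 :: rest).Pairwise pvLtT)
    (hq : 2 ≤ (pvNN (h1 :: rest)).length)
    (hd : 2 ∣ ((pvNN (h1 :: rest)).sum - 1))
    (hb : ∀ v ∈ pvNN (h1 :: rest), 2 * v ≤ (pvNN (h1 :: rest)).sum + 1) :
    h1.1 < 0 ∧ pvGoodPair ((h1.1 + 1, h1.2) :: rest) := by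
  have hle : h1.1 ≤ 0 := by
    by_contra hc
    have hnil : pvNN (h1 :: rest) = [] := by
      simp only [pvNN]
      rw [List.filter_eq_nil_iff.2 ?_]
      · rfl
      · intro t ht
        rcases List.mem_cons.1 ht with rfl | ht'
        · simp; omega
        · have := sorted_le_head h1 rest hpw t ht'; simp; omega
    rw [hnil] at hq; simp at hq
  have hneg : h1.1 < 0 := by
    rcases lt_or_eq_of_le hle with h | h
    · exact h
    · exfalso
      have hz : (pvNN (h1 :: rest)).sum = 0 := by
        apply List.sum_eq_zero
        intro v hv
        rcases List.mem_map.1 hv with ⟨t, htf, rfl⟩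
        have htle : t.1 ≤ 0 := by have := List.of_mem_filter htf; simpa using this
        have htm := List.mem_of_mem_filter htf
        rcases List.mem_cons.1 htm with rfl | ht'
        · omega
        · have := sorted_le_head h1 rest hpw t ht'; omega
      rw [hz] at hd
      omega
  rw [pvNN_cons, if_pos (by omega)] at hq hd hb
  have hM := hb (-h1.1) List.mem_cons_self
  simp only [List.sum_cons] at hd hb hM
  refine ⟨hneg, ?_, ?_, ?_⟩
  · rw [pvNN_cons, if_pos (by simp; omega)]
    simpa using hq
  · rw [pvNN_cons, if_pos (by simp; omega)]
    simp only [List.sum_cons]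
    simp only [show -(h1.1 + 1) = -h1.1 - 1 by ring]
    omega
  · rw [pvNN_cons, if_pos (by simp; omega)]
    intro v hv
    simp only [List.sum_cons]
    rcases List.mem_cons.1 hv with rfl | hv'
    · simp; omega
    · have hbv := hb v (List.mem_cons_of_mem _ hv')
      rcases List.mem_map.1 hv' with ⟨t, htf, rfl⟩
      have htle : t.1 ≤ 0 := by have := List.of_mem_filter htf; simpa using this
      have ht2 : t ∈ rest := List.mem_of_mem_filter htf
      have hcM : -t.1 ≤ -h1.1 := by
        have := sorted_le_head h1 rest hpw t ht2; omega
      have hcR : -t.1 ≤ (pvNN rest).sum :=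
        List.single_le_sum (pvNN_nonneg rest) _ (List.mem_map.2 ⟨t, htf, rfl⟩)
      omega

theorem pvNN_enum_aux (l : List (String × Int)) : ∀ s : Int,
    ((((PySem.List.enumerate l s).map (fun p => (-(p.2.2), p.1, p.2.1))).filter
        (fun t => decide (t.1 ≤ 0))).map (fun t => -t.1)) =
      (l.map (·.2)).filter (fun v => decide (0 ≤ v)) := by
  induction l with
  | nil => intro s; rfl
  | cons p t ih =>
    intro s
    show ((((s, p) :: PySem.List.enumerate t (s+1)).map
        (fun p => (-(p.2.2), p.1, p.2.1))).filter (fun t => decide (t.1 ≤ 0))).map (fun t => -t.1) = _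
    rw [List.map_cons, List.filter_cons]
    by_cases hp : 0 ≤ p.2
    · rw [if_pos (by simpa using hp)]
      rw [List.map_cons, List.map_cons, List.filter_cons, if_pos (by simpa using hp)]
      rw [ih (s+1)]
      simp
    · rw [if_neg (by simpa using hp)]
      rw [List.map_cons, List.filter_cons, if_neg (by simpa using hp)]
      exact ih (s+1)

theorem pvNN_triples (l : List (String × Int)) :
    pvNN (pvTriples l) = (l.map (·.2)).filter (fun v => decide (0 ≤ v)) := by
  simpa [pvNN, pvTriples] using pvNN_enum_aux l 0

theorem loop_eq : ∀ (fuel : Nat) (d : PySem.Dict String Int) (H : List (Int × Int × String))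
    (ans : List String), pvInv d H → aloop fuel d ans = bloop fuel H ans := by
  intro fuel
  induction fuel with
  | zero => intro d H ans _; rfl
  | succ fu ih =>
    intro d H ans hInv
    obtain ⟨hnd, hperm, hpw, hgood⟩ := hInv
    cases H with
    | nil =>
      exfalso
      rcases hgood with ⟨h1, rest, heq, _⟩ | ⟨hq, _, _⟩
      · simp at heq
      · simp [pvNN] at hq
    | cons h1 rest =>
      obtain ⟨hmost, hmostval⟩ := most_eq d h1 rest hnd hperm hpw
      have hidx := perm_idx_nodup d _ hperm
      have hm1 : h1 ∈ pvTriples d.items := hperm.mem_iff.1 List.mem_cons_self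
      have hc1 : d.contains h1.2.2 = true := mem_key_contains d h1 hm1
      cases rest with
      | nil =>
        simp only [aloop, bloop, hmost, Option.getD_some]
        rcases hgood with ⟨h1', rest', heq, hle, hdvd, hself⟩ | hgp
        · injection heq with e1 e2
          subst e1; subst e2
          have hsec := second_self_eq d h1 [] hnd hperm hpw hself
          rw [hsec, Option.getD_some, hmostval]
          by_cases hz : h1.1 = 0
          · rw [if_pos ⟨by omega, by omega⟩, if_neg (by omega)]
          · have hneg : h1.1 < 0 := by omega
            rw [if_neg (by rintro ⟨ha, _⟩; omega), if_pos hneg]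
            rw [PySem.Dict.getD_insert_self, PySem.Dict.insert_insert_self]
            apply ih
            refine ⟨?_, ?_, ?_, Or.inl ?_⟩
            · rw [PySem.Dict.keys_insert_of_contains d _ hc1]; exact hnd
            · have hp := perm_upd d h1 [] hnd hperm (-h1.1 - 1 - 1)
              rw [show -(-h1.1 - 1 - 1) = h1.1 + 2 by ring] at hp
              exact (hpush_perm _ _).trans hp
            · exact hpush_pairwise _ [] (List.Pairwise.nil) (by intro y hy; simp at hy)
            · rw [hpush_head _ [] (by intro y hy; simp at hy)]
              exact ⟨(h1.1 + 2, h1.2), [], rfl, by simp; omega, by simp; omega, by intro t ht; simp at ht⟩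
        · exfalso
          have hq := hgp.1
          rw [pvNN_cons] at hq
          by_cases hh : h1.1 ≤ 0
          · rw [if_pos hh] at hq; simp [pvNN] at hq
          · rw [if_neg hh] at hq; simp [pvNN] at hq
      | cons h2 rest2 =>
        simp only [aloop, bloop, hmost, Option.getD_some]
        rcases hgood with ⟨h1', rest', heq, hle, hdvd, hself⟩ | hgp
        · -- self-pairing case with other (inert) keys
          injection heq with e1 e2
          subst e1; subst e2
          have hsec := second_self_eq d h1 (h2 :: rest2) hnd hperm hpw hself
          rw [hsec, Option.getD_some, hmostval]
          by_cases hz : h1.1 = 0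
          · rw [if_pos ⟨by omega, by omega⟩, if_neg (by omega)]
          · have hneg : h1.1 < 0 := by omega
            have h2ge : ¬ h2.1 < 0 := by
              rcases hself h2 List.mem_cons_self with h | ⟨h, _⟩ <;> omega
            rw [if_neg (by rintro ⟨ha, _⟩; omega), if_pos hneg, if_neg h2ge]
            rw [PySem.Dict.getD_insert_self, PySem.Dict.insert_insert_self]
            apply ih
            refine ⟨?_, ?_, ?_, Or.inl ?_⟩
            · rw [PySem.Dict.keys_insert_of_contains d _ hc1]; exact hnd
            · have hp := perm_upd d h1 (h2 :: rest2) hnd hperm (-h1.1 - 1 - 1)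
              rw [show -(-h1.1 - 1 - 1) = h1.1 + 2 by ring] at hp
              exact (hpush_perm _ _).trans hp
            · refine hpush_pairwise _ _ (List.pairwise_cons.1 hpw).2 ?_
              intro y hy he
              simp only [List.map_cons, List.nodup_cons] at hidx
              exact hidx.1 (by rw [show (h1.1 + 2, h1.2).2.1 = h1.2.1 from rfl] at he; rw [he]; simpa using List.mem_map_of_mem (f := fun t => t.2.1) hy)
            · rw [hpush_head _ _ (by intro y hy; rcases hself y hy with h | ⟨h, _⟩ <;> simp <;> omega)]
              exact ⟨(h1.1 + 2, h1.2), h2 :: rest2, rfl, by simp; omega, by simp; omega,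
                fun t ht => hself t ht⟩
        · -- pairing
          have hm2 : h2 ∈ pvTriples d.items := hperm.mem_iff.1 (List.mem_cons_of_mem _ List.mem_cons_self)
          by_cases hneg : h1.1 < 0
          · have h2neg := pair_h2_neg h1 h2 rest2 hpw hgp hneg
            obtain ⟨hsec, hsecval, hsecne⟩ := second_pair_eq d h1 h2 rest2 hnd hperm hpw (le_of_lt h2neg)
            rw [hsec, Option.getD_some]
            rw [PySem.Dict.getD_insert_of_ne d _ 0 hsecne]
            rw [hmostval, hsecval]
            rw [if_neg (by rintro ⟨ha, _⟩; omega), if_pos hneg, if_pos h2neg]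
            apply ih
            have hc2 : (d.insert h1.2.2 (-h1.1 - 1)).contains h2.2.2 = true := by
              rw [PySem.Dict.contains_iff_mem_keys, PySem.Dict.keys_insert_of_contains d _ hc1,
                ← PySem.Dict.contains_iff_mem_keys]
              exact mem_key_contains d h2 hm2
            have hnd1 : (d.insert h1.2.2 (-h1.1 - 1)).keys.Nodup := by
              rw [PySem.Dict.keys_insert_of_contains d _ hc1]; exact hnd
            have hperm1 := perm_upd d h1 (h2 :: rest2) hnd hperm (-h1.1 - 1)
            rw [show -(-h1.1 - 1) = h1.1 + 1 by ring] at hperm1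
            have hswap : (h2 :: (h1.1 + 1, h1.2) :: rest2).Perm ((h1.1 + 1, h1.2) :: h2 :: rest2) :=
              List.Perm.swap _ _ _
            have hperm2 := perm_upd (d.insert h1.2.2 (-h1.1 - 1)) h2 ((h1.1 + 1, h1.2) :: rest2)
              hnd1 (hswap.trans hperm1) (-h2.1 - 1)
            rw [show -(-h2.1 - 1) = h2.1 + 1 by ring] at hperm2
            have hbp' : (hpush (h1.1 + 1, h1.2) (hpush (h2.1 + 1, h2.2) rest2)).Perm
                ((h1.1 + 1, h1.2) :: (h2.1 + 1, h2.2) :: rest2) :=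
              (hpush_perm _ _).trans ((hpush_perm _ _).cons _)
            simp only [List.map_cons, List.nodup_cons, List.mem_cons] at hidx
            refine ⟨?_, ?_, ?_, Or.inr ?_⟩
            · rw [PySem.Dict.keys_insert_of_contains _ _ hc2]; exact hnd1
            · exact (hbp'.trans (List.Perm.swap _ _ _)).trans hperm2
            · refine hpush_pairwise _ _ (hpush_pairwise _ _
                (List.pairwise_cons.1 (List.pairwise_cons.1 hpw).2).2 ?_) ?_
              · intro y hy he
                exact hidx.2.1 (by rw [show (h2.1 + 1, h2.2).2.1 = h2.2.1 from rfl] at he; rw [he]; exact List.mem_map_of_mem hy)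
              · intro y hy he
                rcases List.mem_cons.1 ((hpush_perm _ _).mem_iff.1 hy) with rfl | hy'
                · exact hidx.1 (Or.inl (by simpa using he))
                · exact hidx.1 (Or.inr (by rw [show (h1.1 + 1, h1.2).2.1 = h1.2.1 from rfl] at he; rw [he]; exact List.mem_map_of_mem hy'))
            · exact goodpair_perm _ _ hbp' (good_pair_step h1 h2 rest2 hpw hgp hneg h2neg)
          · obtain ⟨hz1, h2', rest2', heqr, hz2⟩ := pair_break h1 (h2 :: rest2) hpw hgp hneg
            injection heqr with e1 e2
            subst e1; subst e2
            obtain ⟨hsec, hsecval, _⟩ := second_pair_eq d h1 h2 rest2 hnd hperm hpw (by omega)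
            rw [hsec, Option.getD_some, hmostval, hsecval]
            rw [if_pos ⟨by omega, by omega⟩, if_neg hneg]

theorem head_of_strict_min (H : List (Int × Int × String)) (x : Int × Int × String)
    (hpw : H.Pairwise pvLtT) (hidx : (H.map (fun t => t.2.1)).Nodup) (hx : x ∈ H)
    (hmin : ∀ t ∈ H, t.2.1 ≠ x.2.1 → pvLtT x t) : ∃ rest, H = x :: rest := by
  cases H with
  | nil => simp at hx
  | cons h hs =>
    rcases List.mem_cons.1 hx with rfl | hx'
    · exact ⟨hs, rfl⟩
    · exfalso
      have hhx : pvLtT h x := (List.pairwise_cons.1 hpw).1 x hx'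
      by_cases he : h.2.1 = x.2.1
      · simp only [List.map_cons, List.nodup_cons] at hidx
        exact hidx.1 (he ▸ List.mem_map_of_mem hx')
      · have := hmin h List.mem_cons_self (by intro hc; exact he hc)
        rcases hhx with h' | ⟨e1, l1⟩ <;> rcases this with h'' | ⟨e2, l2⟩ <;> omega

theorem self_tail (d : PySem.Dict String Int) (x : Int × Int × String)
    (rest : List (Int × Int × String)) (hperm : (x :: rest).Perm (pvTriples d.items))
    (hidx : ((x :: rest).map (fun t => t.2.1)).Nodup) (j : Nat) (hj : j < d.items.length)
    (hx : x.2.1 = (j : Int))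
    (hothers : ∀ i < d.items.length, i ≠ j →
      ((d.items.getD i ("", 0)).2 < -10 ∨ ((d.items.getD i ("", 0)).2 = -10 ∧ j < i))) :
    ∀ t ∈ rest, 10 < t.1 ∨ (t.1 = 10 ∧ x.2.1 < t.2.1) := by
  intro t ht
  have htm : t ∈ pvTriples d.items := hperm.mem_iff.1 (List.mem_cons_of_mem _ ht)
  rcases (triples_mem _ _).1 htm with ⟨i, hi, rfl⟩
  have hij : i ≠ j := by
    intro he
    simp only [List.map_cons, List.nodup_cons] at hidx
    refine hidx.1 ?_
    rw [hx, ← he]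
    exact List.mem_map_of_mem ht
  rcases hothers i hi hij with h | ⟨h, hlt⟩
  · rw [List.getD_eq_getElem _ _ hi] at h
    exact Or.inl (by simp; omega)
  · rw [List.getD_eq_getElem _ _ hi] at h
    exact Or.inr ⟨by simp; omega, by rw [hx]; simp; omega⟩

theorem self_min (d : PySem.Dict String Int) (H0 : List (Int × Int × String))
    (hperm : H0.Perm (pvTriples d.items)) (j : Nat) (hj : j < d.items.length)
    (hothers : ∀ i < d.items.length, i ≠ j →
      ((d.items.getD i ("", 0)).2 < -10 ∨ ((d.items.getD i ("", 0)).2 = -10 ∧ j < i)))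
    (hv0 : 0 ≤ (d.items[j]).2) :
    ∀ t ∈ H0, t.2.1 ≠ (-(d.items[j].2), (j : Int), d.items[j].1).2.1 →
      pvLtT (-(d.items[j].2), (j : Int), d.items[j].1) t := by
  intro t ht hne'
  have htm : t ∈ pvTriples d.items := hperm.mem_iff.1 ht
  rcases (triples_mem _ _).1 htm with ⟨i, hi, rfl⟩
  have hij : i ≠ j := by simp at hne'; omega
  rcases hothers i hi hij with h | ⟨h, _⟩ <;>
    · rw [List.getD_eq_getElem _ _ hi] at h
      exact Or.inl (by simp; omega)

theorem solve_eq_alt (n : Int) (P : List (String × Int)) (hpre : Pre_solve n P) :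
    solve n P = solve_alt n P := by
  obtain ⟨hne, hcase⟩ := hpre
  have hnd := PySem.Dict.nodup_keys_ofList P
  show (let d := PySem.Dict.ofList P
    let total := (d.keys.map (fun k => d.getD k 0)).sum
    let fuel := (d.values.map Int.natAbs).sum + 1
    let st :=
      if PySem.Int.mod total 2 = 1 then
        let c := (PySem.List.max? d.keys (fun k => d.getD k 0)).getD ""
        (d.insert c (d.getD c 0 - 1), [c])
      else (d, ([] : List String))
    PySem.Str.join " " (aloop fuel st.1 st.2)) =
    (let d := PySem.Dict.ofList P
    let total := d.values.sum
    let fuel := (d.values.map Int.natAbs).sum + 1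
    let heap0 := (pvTriples d.items).foldl (fun acc x => hpush x acc) []
    let st :=
      if PySem.Int.mod total 2 = 1 then
        match heap0 with
        | [] => (([] : List (Int × Int × String)), ([] : List String))
        | t :: rest => (hpush (t.1 + 1, t.2) rest, [t.2.2])
      else (heap0, ([] : List String))
    PySem.Str.join " " (bloop fuel st.1 st.2))
  simp only []
  generalize hD : PySem.Dict.ofList P = D at hne hcase hnd ⊢
  have hv : D.values = D.items.map (·.2) := by simp [PySem.Dict.values]
  have htot : (D.keys.map (fun k => D.getD k 0)).sum = D.values.sum := by
    rw [PySem.Dict.values_eq_map_keys D hnd 0]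
  rw [htot]
  set H0 := (pvTriples D.items).foldl (fun acc x => hpush x acc) [] with hH0def
  have hH0perm : H0.Perm (pvTriples D.items) := by
    have := heapify_perm (pvTriples D.items) []
    simpa [hH0def] using this
  have hH0pw : H0.Pairwise pvLtT :=
    heapify_pairwise _ [] List.Pairwise.nil (by simpa using triples_idx_nodup D.items)
  have hH0idx : (H0.map (fun t => t.2.1)).Nodup := perm_idx_nodup D H0 hH0perm
  have hNN : (pvNN H0).Perm ((D.items.map (·.2)).filter (fun v => decide (0 ≤ v))) := by
    rw [← pvNN_triples]
    exact pvNN_perm _ _ hH0perm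
  congr 1
  by_cases hodd : PySem.Int.mod D.values.sum 2 = 1
  · -- odd total: both sides decrement the most frequent key first
    have hoddI : PySem.Int.mod ((D.items.map (·.2)).sum) 2 = 1 := by rw [← hv]; exact hodd
    rw [if_pos hodd, if_pos hodd]
    have hlen : H0.length = D.items.length := hH0perm.length_eq.trans (triples_length D.items)
    cases hH0 : H0 with
    | nil =>
      exfalso
      apply hne
      have h0 : D.items.length = 0 := by rw [← hlen, hH0]; rfl
      exact List.length_eq_zero_iff.mp h0
    | cons h1 rest =>
      rw [hH0] at hH0perm hH0pw hH0idx hNN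
      obtain ⟨hmost, hmostval⟩ := most_eq D h1 rest hnd hH0perm hH0pw
      have hc1 : D.contains h1.2.2 = true :=
        mem_key_contains D h1 (hH0perm.mem_iff.1 List.mem_cons_self)
      show aloop _ (D.insert ((PySem.List.max? D.keys fun k => D.getD k 0).getD "")
          (D.getD ((PySem.List.max? D.keys fun k => D.getD k 0).getD "") 0 - 1))
        [(PySem.List.max? D.keys fun k => D.getD k 0).getD ""] =
        bloop _ (hpush (h1.1 + 1, h1.2) rest) [h1.2.2]
      rw [hmost, Option.getD_some, hmostval]
      apply loop_eq
      refine ⟨?_, ?_, ?_, ?_⟩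
      · rw [PySem.Dict.keys_insert_of_contains D _ hc1]; exact hnd
      · have hp := perm_upd D h1 rest hnd hH0perm (-h1.1 - 1)
        rw [show -(-h1.1 - 1) = h1.1 + 1 by ring] at hp
        exact (hpush_perm _ _).trans hp
      · refine hpush_pairwise _ _ (List.pairwise_cons.1 hH0pw).2 ?_
        intro y hy he
        simp only [List.map_cons, List.nodup_cons] at hH0idx
        exact hH0idx.1 (by rw [show (h1.1 + 1, h1.2).2.1 = h1.2.1 from rfl] at he; rw [he]; exact List.mem_map_of_mem hy)
      · rcases hcase with ⟨hq, hdp, hb⟩ | ⟨j, hj, hv0, hpar, hothers⟩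
        · -- pairing precondition, odd
          rw [hoddI] at hdp hb
          refine Or.inr (goodpair_perm _ _ (hpush_perm _ _) ?_)
          have hq' : 2 ≤ (pvNN (h1 :: rest)).length := by rw [hNN.length_eq]; exact hq
          have hd' : 2 ∣ ((pvNN (h1 :: rest)).sum - 1) := by
            rw [hNN.sum_eq]
            exact (PySem.Int.mod_eq_zero_iff_dvd _ _).mp hdp
          have hb' : ∀ v ∈ pvNN (h1 :: rest), 2 * v ≤ (pvNN (h1 :: rest)).sum + 1 := by
            intro v hvv
            rw [hNN.sum_eq]
            exact hb v (hNN.mem_iff.1 hvv)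
          exact (good_pair_odd h1 rest hH0pw hq' hd' hb').2
        · -- self-pairing precondition, odd
          rw [hoddI] at hpar
          have hgd : (D.items.getD j ("", 0)) = D.items[j] := List.getD_eq_getElem _ _ hj
          rw [hgd] at hv0 hpar
          have hjx : (-(D.items[j].2), (j : Int), D.items[j].1) ∈ h1 :: rest :=
            hH0perm.mem_iff.2 (triple_at_mem D.items j hj)
          obtain ⟨rest', heq'⟩ := head_of_strict_min (h1 :: rest) _ hH0pw hH0idx hjx
            (self_min D _ hH0perm j hj hothers hv0)
          injection heq' with e1 e2
          have hdd : 2 ∣ (D.items[j].2 - 1) := (PySem.Int.mod_eq_zero_iff_dvd _ _).mp hpar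
          refine Or.inl ?_
          rw [hpush_head _ _ ?_]
          · refine ⟨(h1.1 + 1, h1.2), rest, rfl, ?_, ?_, ?_⟩
            · show h1.1 + 1 ≤ 0
              rw [e1]
              simp
              omega
            · show 2 ∣ h1.1 + 1
              rw [e1]
              simp
              omega
            · show ∀ t ∈ rest, 10 < t.1 ∨ (t.1 = 10 ∧ (h1.1 + 1, h1.2).2.1 < t.2.1)
              have := self_tail D h1 rest hH0perm hH0idx j hj (by rw [e1]) hothers
              exact fun t ht => this t ht
          · intro y hy
            have := self_tail D h1 rest hH0perm hH0idx j hj (by rw [e1]) hothers y hy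
            have hh1v : h1.1 = -(D.items[j].2) := by rw [e1]
            show h1.1 + 1 < y.1
            rcases this with h | ⟨h, _⟩ <;> omega
  · rw [if_neg hodd, if_neg hodd]
    apply loop_eq
    refine ⟨hnd, hH0perm, hH0pw, ?_⟩
    have hm2 := PySem.Int.mod_two_eq D.values.sum
    have hz : PySem.Int.mod ((D.items.map (·.2)).sum) 2 = 0 := by
      rw [← hv]; tauto
    rcases hcase with ⟨hq, hdp, hb⟩ | ⟨j, hj, hv0, hpar, hothers⟩
    · rw [hz] at hdp hb
      refine Or.inr ⟨?_, ?_, ?_⟩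
      · rw [hNN.length_eq]; exact hq
      · rw [hNN.sum_eq]
        have := (PySem.Int.mod_eq_zero_iff_dvd _ _).mp hdp
        simpa using this
      · intro v hvv
        rw [hNN.sum_eq]
        have := hb v (hNN.mem_iff.1 hvv)
        simpa using this
    · rw [hz] at hpar
      have hgd : (D.items.getD j ("", 0)) = D.items[j] := List.getD_eq_getElem _ _ hj
      rw [hgd] at hv0 hpar
      have hjx : (-(D.items[j].2), (j : Int), D.items[j].1) ∈ H0 :=
        hH0perm.mem_iff.2 (triple_at_mem D.items j hj)
      obtain ⟨rest', heq'⟩ := head_of_strict_min H0 _ hH0pw hH0idx hjx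
        (self_min D _ hH0perm j hj hothers hv0)
      rw [heq']
      refine Or.inl ⟨_, rest', rfl, by simp; omega, ?_, ?_⟩
      · show 2 ∣ -(D.items[j].2)
        have h2d : 2 ∣ D.items[j].2 := by simpa using hpar
        omega
      · rw [heq'] at hH0perm hH0idx
        exact self_tail D _ rest' hH0perm hH0idx j hj rfl hothers

-- ===== VERDICT (by name: the statement is the Claim_ definition above) =====
theorem solve_spec : Claim_equal_solve := by
  intro n P _ hpre
  show solve n P = solve_alt n P
  exact solve_eq_alt n P hpre
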